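-- pv_equiv track=rewrite | github.com/thboutet/STAGE-M1 | script_cluster.py | combined_dico
-- ===== SOURCE A (Python) =====
-- def combined_dico (clusters, supclusters) :
-- 	liste_gene=[]
-- 	compt=0
-- 	for cluster, liste in clusters.items() :		#Ici je récupère les gènes de la database qui n'ont pas été clusterisés par le premier cd-hit
-- 		if len(liste) == 2 :				#Si la liste est égal à deux le gène est seul dans son cluster (nom + taille)
-- 			for supcluster, gene_predits in supclusters.items() :	#J'ouvre mon dico du second cluster
-- 				if len(gene_predits) > 2 and liste[0] == gene_predits[2] : #Si j'ai des gènes qui ont était clusterisé (> 2), je regarde s'il s'agit des gènes qui n'avaient pas de cluster à la base. Si l'élément 0 de la liste et égal à l'élément 2 du gène prédits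
-- 					clusters[cluster].append(gene_predits[0])	#J'ajoute dans mon dico de clusters de base le gène prédits par l'outil qui y correspond
-- 					clusters[cluster].append(gene_predits[1])	#J'ajoute également sa taille
-- 	return clusters
-- ===== SOURCE B (Python) =====
-- def combined_dico(clusters, supclusters):
--     # Index predicted genes by their reference name (gene_predits[2]):
--     # one pass over supclusters, then one O(1) lookup per singleton cluster.
--     # Like A, this mutates the lists inside `clusters` in place and returns it.
--     index = {}
--     for gene_predits in supclusters.values():
--         if len(gene_predits) > 2:
--             index.setdefault(gene_predits[2], []).extend(gene_predits[:2])
--     for liste in clusters.values():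
--         if len(liste) == 2:
--             liste.extend(index.get(liste[0], []))
--     return clusters
-- ===== Notes on version B (the rewrite author's own statement) =====
-- stated objective: alternative
-- what changed: B builds a dict indexing supcluster entries by gene_predits[2] in one pass and does a single lookup per singleton cluster, replacing A's inner scan of all supclusters for every cluster (asymptotically better when singleton clusters are frequent, but not measurably faster on the benchmark inputs).
import Mathlib
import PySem

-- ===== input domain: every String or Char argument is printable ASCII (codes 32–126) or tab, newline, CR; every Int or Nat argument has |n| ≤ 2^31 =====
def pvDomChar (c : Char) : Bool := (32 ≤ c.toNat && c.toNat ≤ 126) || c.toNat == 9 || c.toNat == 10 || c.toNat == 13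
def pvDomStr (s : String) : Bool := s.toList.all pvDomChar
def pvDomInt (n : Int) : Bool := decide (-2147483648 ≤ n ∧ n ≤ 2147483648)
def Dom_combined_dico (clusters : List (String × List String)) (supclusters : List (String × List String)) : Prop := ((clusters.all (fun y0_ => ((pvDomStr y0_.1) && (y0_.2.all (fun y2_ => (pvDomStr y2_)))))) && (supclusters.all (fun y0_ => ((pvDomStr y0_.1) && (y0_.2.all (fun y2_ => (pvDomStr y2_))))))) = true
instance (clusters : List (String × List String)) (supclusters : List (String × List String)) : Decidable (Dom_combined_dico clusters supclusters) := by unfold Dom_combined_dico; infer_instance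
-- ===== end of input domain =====

-- B replaces A's per-cluster scan of supclusters with a dict index built once, one lookup per
-- singleton cluster; equivalence is about the RETURN value (both Pythons also mutate `clusters` in place the same way).

-- ===== PORT A =====
-- exact port of `clusters[cluster].append(x)`: the dict holds unique keys (Pre_), so
-- updating the first matching entry in the association list is the dict item update
def pvUpdAppend (d : List (String × List String)) (k : String) (xs : List String) : List (String × List String) :=
  match d with
  | [] => []
  | (k', v) :: t => if k' = k then (k', v ++ xs) :: t else (k', v) :: pvUpdAppend t k xs

-- indices: liste[0] is in range under `len(liste) == 2`, gene_predits[0/1/2] under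
-- `len(gene_predits) > 2`, so List.getD is exact there
def combined_dico (clusters : List (String × List String)) (supclusters : List (String × List String)) : List (String × List String) :=
  clusters.foldl (fun d p =>
    if p.2.length = 2 then
      supclusters.foldl (fun d2 q =>
        if 2 < q.2.length ∧ p.2.getD 0 "" = q.2.getD 2 "" then
          pvUpdAppend (pvUpdAppend d2 p.1 [q.2.getD 0 ""]) p.1 [q.2.getD 1 ""]
        else d2) d
    else d) clusters

-- ===== PORT B =====
-- index.setdefault(key, []).extend([g0, g1])  =  Dict.modify key [] (· ++ [g0, g1])
def pvIndex (supclusters : List (String × List String)) : PySem.Dict String (List String) :=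
  supclusters.foldl (fun d q =>
    if 2 < q.2.length then
      d.modify (q.2.getD 2 "") [] (fun v => v ++ [q.2.getD 0 "", q.2.getD 1 ""])
    else d) PySem.Dict.empty

def combined_dico_alt (clusters : List (String × List String)) (supclusters : List (String × List String)) : List (String × List String) :=
  clusters.map (fun p =>
    if p.2.length = 2 then (p.1, p.2 ++ (pvIndex supclusters).getD (p.2.getD 0 "") []) else p)

-- ===== PRECONDITION & SPEC =====
-- The association lists stand for Python dicts, whose keys are unique; Pre_ requires this of
-- `clusters` (A mutates it through key lookup, which has no meaning for duplicated keys).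
def Pre_combined_dico (clusters : List (String × List String)) (supclusters : List (String × List String)) : Prop :=
  (clusters.map Prod.fst).Nodup
instance (clusters : List (String × List String)) (supclusters : List (String × List String)) : Decidable (Pre_combined_dico clusters supclusters) := by unfold Pre_combined_dico; infer_instance

def pvWitness_combined_dico : (List (String × List String)) × (List (String × List String)) :=
  ([("c0", ["g1", "12"]), ("c1", ["g2", "7", "g9", "8"])], [("s0", ["p1", "33", "g1"]), ("s1", ["p2", "4"])])

def Spec_combined_dico (clusters : List (String × List String)) (supclusters : List (String × List String)) (out : List (String × List String)) : Prop := out = combined_dico_alt clusters supclusters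
instance (clusters : List (String × List String)) (supclusters : List (String × List String)) (out : List (String × List String)) : Decidable (Spec_combined_dico clusters supclusters out) := by unfold Spec_combined_dico; infer_instance

-- ===== CLAIM (what is proved, stated in full; the proofs are below) =====
def Claim_equal_combined_dico : Prop := ∀ (clusters : List (String × List String)) (supclusters : List (String × List String)), Dom_combined_dico clusters supclusters → Pre_combined_dico clusters supclusters → Spec_combined_dico clusters supclusters (combined_dico clusters supclusters)

-- ===== LEMMAS AND PROOFS =====

-- the genes appended for a singleton cluster whose gene is `key`, in supclusters order
def pvMatches (supclusters : List (String × List String)) (key : String) : List String :=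
  supclusters.flatMap (fun q =>
    if 2 < q.2.length ∧ key = q.2.getD 2 "" then [q.2.getD 0 "", q.2.getD 1 ""] else [])

theorem pvUpdAppend_skip (pre : List (String × List String)) (k : String) (xs : List String)
    (t : List (String × List String)) (h : k ∉ pre.map Prod.fst) :
    pvUpdAppend (pre ++ t) k xs = pre ++ pvUpdAppend t k xs := by
  induction pre with
  | nil => rfl
  | cons a l ih =>
    simp only [List.map_cons, List.mem_cons, not_or] at h
    simp [pvUpdAppend, Ne.symm h.1, ih h.2]

theorem pvUpdAppend_here (k : String) (v xs : List String) (t : List (String × List String)) :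
    pvUpdAppend ((k, v) :: t) k xs = (k, v ++ xs) :: t := by
  simp [pvUpdAppend]

theorem innerA (key : String) (k : String) :
    ∀ (s pre : List (String × List String)) (v : List String) (t : List (String × List String)),
    k ∉ pre.map Prod.fst →
    s.foldl (fun d2 q =>
        if 2 < q.2.length ∧ key = q.2.getD 2 "" then
          pvUpdAppend (pvUpdAppend d2 k [q.2.getD 0 ""]) k [q.2.getD 1 ""]
        else d2) (pre ++ (k, v) :: t)
      = pre ++ (k, v ++ pvMatches s key) :: t := by
  intro s
  induction s with
  | nil => intro pre v t h; simp [pvMatches]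
  | cons q s ih =>
    intro pre v t h
    by_cases hc : 2 < q.2.length ∧ key = q.2.getD 2 ""
    · have hstep : pvMatches (q :: s) key = [q.2.getD 0 "", q.2.getD 1 ""] ++ pvMatches s key := by
        unfold pvMatches; rw [List.flatMap_cons, if_pos hc]
      simp only [List.foldl_cons, if_pos hc]
      rw [pvUpdAppend_skip pre k _ _ h, pvUpdAppend_here,
          pvUpdAppend_skip pre k _ _ h, pvUpdAppend_here, ih pre _ t h, hstep]
      simp [List.append_assoc]
    · have hstep : pvMatches (q :: s) key = pvMatches s key := by
        unfold pvMatches; rw [List.flatMap_cons, if_neg hc]; simp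
      simp only [List.foldl_cons, if_neg hc]
      rw [ih pre v t h, hstep]

-- the per-cluster result (what B computes for each entry)
def pvF (supclusters : List (String × List String)) (p : String × List String) : String × List String :=
  if p.2.length = 2 then (p.1, p.2 ++ pvMatches supclusters (p.2.getD 0 "")) else p

theorem outerA (supclusters : List (String × List String)) :
    ∀ (post pre : List (String × List String)),
    ((pre ++ post).map Prod.fst).Nodup →
    post.foldl (fun d p =>
        if p.2.length = 2 then
          supclusters.foldl (fun d2 q =>
            if 2 < q.2.length ∧ p.2.getD 0 "" = q.2.getD 2 "" then
              pvUpdAppend (pvUpdAppend d2 p.1 [q.2.getD 0 ""]) p.1 [q.2.getD 1 ""]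
            else d2) d
        else d) (pre ++ post)
      = pre ++ post.map (pvF supclusters) := by
  intro post
  induction post with
  | nil => intro pre h; simp
  | cons p t ih =>
    intro pre h
    have hk : p.1 ∉ pre.map Prod.fst := by
      intro hmem
      have := h
      rw [List.map_append] at this
      rcases (List.nodup_append.mp this) with ⟨_, _, hdisj⟩
      exact hdisj p.1 hmem p.1 (by simp) rfl
    simp only [List.foldl_cons]
    by_cases hl : p.2.length = 2
    · rw [if_pos hl, innerA (p.2.getD 0 "") p.1 supclusters pre p.2 t hk]
      have heq : pre ++ (p.1, p.2 ++ pvMatches supclusters (p.2.getD 0 "")) :: t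
          = (pre ++ [pvF supclusters p]) ++ t := by simp [pvF, if_pos hl]
      rw [heq, ih (pre ++ [pvF supclusters p]) (by
        have : ((pre ++ [pvF supclusters p]) ++ t).map Prod.fst = ((pre ++ p :: t).map Prod.fst) := by
          simp [pvF]; split <;> simp
        rw [this]; exact h)]
      simp [pvF, if_pos hl]
    · rw [if_neg hl]
      have heq : pre ++ p :: t = (pre ++ [p]) ++ t := by simp
      rw [heq, ih (pre ++ [p]) (by rw [← heq]; exact h)]
      simp [pvF, if_neg hl]

theorem indexB (key : String) :
    ∀ (s : List (String × List String)) (d : PySem.Dict String (List String)),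
    (s.foldl (fun d q =>
        if 2 < q.2.length then
          d.modify (q.2.getD 2 "") [] (fun v => v ++ [q.2.getD 0 "", q.2.getD 1 ""])
        else d) d).getD key []
      = d.getD key [] ++ pvMatches s key := by
  intro s
  induction s with
  | nil => intro d; simp [pvMatches]
  | cons q t ih =>
    intro d
    by_cases hlen : 2 < q.2.length
    · simp only [List.foldl_cons, if_pos hlen]
      rw [ih, PySem.Dict.getD_modify]
      by_cases hk : key = q.2.getD 2 ""
      · have hstep : pvMatches (q :: t) key = [q.2.getD 0 "", q.2.getD 1 ""] ++ pvMatches t key := by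
          unfold pvMatches; rw [List.flatMap_cons, if_pos ⟨hlen, hk⟩]
        rw [if_pos hk, hstep, ← hk]
        simp [List.append_assoc]
      · have hstep : pvMatches (q :: t) key = pvMatches t key := by
          unfold pvMatches; rw [List.flatMap_cons, if_neg (by tauto : ¬(2 < q.2.length ∧ key = q.2.getD 2 ""))]; simp
        rw [if_neg hk, hstep]
    · have hstep : pvMatches (q :: t) key = pvMatches t key := by
        unfold pvMatches; rw [List.flatMap_cons, if_neg (by tauto : ¬(2 < q.2.length ∧ key = q.2.getD 2 ""))]; simp
      simp only [List.foldl_cons, if_neg hlen]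
      rw [ih, hstep]

theorem altB_eq_map (clusters supclusters : List (String × List String)) :
    combined_dico_alt clusters supclusters = clusters.map (pvF supclusters) := by
  unfold combined_dico_alt
  apply List.map_congr_left
  intro p _
  unfold pvF
  by_cases hl : p.2.length = 2
  · rw [if_pos hl, if_pos hl]
    have := indexB (p.2.getD 0 "") supclusters PySem.Dict.empty
    rw [pvIndex, this, PySem.Dict.getD_empty]
    simp
  · rw [if_neg hl, if_neg hl]

-- ===== VERDICT (by name: the statement is the Claim_ definition above) =====
theorem combined_dico_spec : Claim_equal_combined_dico := by
  intro clusters supclusters _ hpre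
  unfold Spec_combined_dico
  rw [altB_eq_map]
  unfold combined_dico
  have := outerA supclusters clusters [] (by simpa using hpre)
  simpa using this
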